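-- pv_equiv track=rewrite | github.com/ognensan/adventofcode | day2/2_count_invalid_any_repeats.py | has_repeating_sequence
-- ===== SOURCE A (Python) =====
-- def has_repeating_sequence(num):
--     """Check if a number has repeating sequences of digits.
--
--     (any number of repeats)
--     """
--     s = str(num)
--     length = len(s)
--
--     # Check all possible pattern lengths (from 1 to half the string length)
--     for pattern_len in range(1, length // 2 + 1):
--         # Only check if the string length is divisible by pattern length
--         if length % pattern_len == 0:
--             pattern = s[:pattern_len]
--             # Pattern cannot have a leading zero
--             if pattern[0] == '0':
--                 continue
--             # Check if repeating this pattern creates the entire string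
--             if pattern * (length // pattern_len) == s:
--                 return True
--
--     return False
-- ===== SOURCE B (Python) =====
-- def has_repeating_sequence(num):
--     """Check if a number has repeating sequences of digits.
--
--     (any number of repeats)
--     """
--     s = str(num)
--     if len(s) < 2 or s[0] == '0':
--         return False
--     # classic doubling trick: s is a repetition of a proper block
--     # iff s occurs inside (s + s) with both endpoints trimmed
--     return s in (s + s)[1:-1]
-- ===== Notes on version B (the rewrite author's own statement) =====
-- stated objective: idiomatic
-- what changed: A loops over all divisor pattern lengths and rebuilds pattern*(length//pattern_len) for each; B decides periodicity with the single standard string-doubling test s in (s+s)[1:-1] after a length/leading-zero guard.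
import Mathlib
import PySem

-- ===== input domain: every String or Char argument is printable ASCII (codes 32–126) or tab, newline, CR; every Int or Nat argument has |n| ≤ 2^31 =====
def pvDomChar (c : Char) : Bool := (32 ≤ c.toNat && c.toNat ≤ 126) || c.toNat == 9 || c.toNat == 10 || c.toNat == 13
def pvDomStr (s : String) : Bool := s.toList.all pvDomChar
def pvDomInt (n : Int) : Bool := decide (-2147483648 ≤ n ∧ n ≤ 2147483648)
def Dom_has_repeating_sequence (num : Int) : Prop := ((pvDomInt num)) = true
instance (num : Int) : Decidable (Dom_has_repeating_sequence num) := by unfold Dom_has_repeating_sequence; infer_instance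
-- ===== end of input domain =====

-- B replaces A's loop over divisor pattern lengths by the standard string-doubling
-- periodicity test `s in (s+s)[1:-1]` behind a length/leading-zero guard (idiomatic).

-- ===== PORT A =====
-- the 'for pattern_len in range(1, length // 2 + 1)' loop with its early 'return True'
def hrsLoop (s : List Char) (length : Int) : List Int → Bool
  | [] => false
  | d :: rest =>
    if PySem.Int.mod length d = 0 then
      let pattern := PySem.List.slice s none (some d)
      if PySem.List.pyGet? pattern 0 = some '0' then hrsLoop s length rest
      else if PySem.List.pyRepeat pattern (PySem.Int.floordiv length d) = s then true
      else hrsLoop s length rest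
    else hrsLoop s length rest

def has_repeating_sequence (num : Int) : Bool :=
  let s := PySem.Int.toChars num
  let length := PySem.List.len s
  hrsLoop s length (PySem.List.pyRange 1 (PySem.Int.floordiv length 2 + 1) 1)

-- ===== PORT B =====
def has_repeating_sequence_alt (num : Int) : Bool :=
  let s := PySem.Int.toChars num
  if decide (PySem.List.len s < 2) || (PySem.List.pyGet? s 0 == some '0') then false
  else PySem.Chars.isIn s (PySem.List.slice (s ++ s) (some 1) (some (-1)))

-- ===== PRECONDITION & SPEC =====
def Spec_has_repeating_sequence (num : Int) (out : Bool) : Prop := out = has_repeating_sequence_alt num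
instance (num : Int) (out : Bool) : Decidable (Spec_has_repeating_sequence num out) := by unfold Spec_has_repeating_sequence; infer_instance

-- ===== CLAIM (what is proved, stated in full; the proofs are below) =====
def Claim_equal_has_repeating_sequence : Prop := ∀ (num : Int), Dom_has_repeating_sequence num → Spec_has_repeating_sequence num (has_repeating_sequence num)

-- ===== LEMMAS AND PROOFS =====

theorem getElem_idx_eq (l : List Char) {i j : Nat} (hij : i = j) (hi : i < l.length) :
    l[i]'hi = l[j]'(hij ▸ hi) := by subst hij; rfl

-- "rotating s left by r fixes it": s[(i+r) % n] = s[i] for all i < n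
def shiftFix (s : List Char) (r : Nat) : Prop :=
  ∀ i (h : i < s.length), s[(i + r) % s.length]'(Nat.mod_lt _ (Nat.zero_lt_of_lt h)) = s[i]

theorem hrsLoop_eq_true_iff (s : List Char) (length : Int) (ds : List Int) :
    hrsLoop s length ds = true ↔
      ∃ d ∈ ds, PySem.Int.mod length d = 0 ∧
        ¬ (PySem.List.pyGet? (PySem.List.slice s none (some d)) 0 = some '0') ∧
        PySem.List.pyRepeat (PySem.List.slice s none (some d)) (PySem.Int.floordiv length d) = s := by
  induction ds with
  | nil => simp [hrsLoop]
  | cons d rest ih =>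
    simp only [hrsLoop]
    split_ifs with h1 h2 h3 <;> simp_all

theorem double_getElem (s : List Char) (j : Nat) (hj : j < 2 * s.length) (h0 : 0 < s.length) :
    (s ++ s)[j]'(by simp; omega) = s[j % s.length]'(Nat.mod_lt _ h0) := by
  rcases lt_or_ge j s.length with h | h
  · rw [List.getElem_append_left h]
    exact getElem_idx_eq s (Nat.mod_eq_of_lt h).symm h
  · rw [List.getElem_append_right h]
    refine getElem_idx_eq s ?_ (by omega)
    rw [Nat.mod_eq_sub_mod h, Nat.mod_eq_of_lt (by omega)]

theorem shiftFix_add (s : List Char) (a b : Nat) (ha : shiftFix s a) (hb : shiftFix s b) :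
    shiftFix s (a + b) := by
  intro i h
  have h1 := hb i h
  have h2 := ha ((i + b) % s.length) (Nat.mod_lt _ (Nat.zero_lt_of_lt h))
  have he : (i + (a + b)) % s.length = ((i + b) % s.length + a) % s.length := by
    rw [Nat.mod_add_mod]
    exact congrArg (· % s.length) (by omega)
  exact ((getElem_idx_eq s he _).trans h2).trans h1

theorem shiftFix_mul (s : List Char) (k r : Nat) (hr : shiftFix s r) : shiftFix s (k * r) := by
  induction k with
  | zero => intro i h; exact getElem_idx_eq s (by simpa using Nat.mod_eq_of_lt h) _
  | succ k ih => have := shiftFix_add s (k * r) r ih hr; simpa [Nat.succ_mul] using this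

theorem shiftFix_mod (s : List Char) (r : Nat) (hr : shiftFix s r) : shiftFix s (r % s.length) := by
  intro i h
  exact (getElem_idx_eq s (Nat.add_mod_mod i r s.length) _).trans (hr i h)

theorem exists_mul_mod_eq_gcd (r n : Nat) (h0 : 0 < r) (hrn : r < n) :
    ∃ k : Nat, (k * r) % n = Nat.gcd r n := by
  have hglt : Nat.gcd r n < n := lt_of_le_of_lt (Nat.le_of_dvd h0 (Nat.gcd_dvd_left r n)) hrn
  have hab : ((Nat.gcd r n : Nat) : Int) = r * Nat.gcdA r n + n * Nat.gcdB r n :=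
    Nat.gcd_eq_gcd_ab r n
  refine ⟨(Nat.gcdA r n % (n : Int)).toNat, ?_⟩
  have hn0 : (0 : Int) < (n : Int) := by exact_mod_cast Nat.lt_of_lt_of_le h0 hrn.le
  have hk : (((Nat.gcdA r n % (n : Int)).toNat : Nat) : Int) = Nat.gcdA r n % (n : Int) :=
    Int.toNat_of_nonneg (Int.emod_nonneg _ (by omega))
  have key : (((Nat.gcdA r n % (n : Int)).toNat * r : Nat) : Int) % n = ((Nat.gcd r n : Nat) : Int) := by
    push_cast [hk]
    rw [Int.mul_emod, Int.emod_emod_of_dvd _ dvd_rfl, ← Int.mul_emod]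
    have hx : Nat.gcdA r n * (r : Int) = ((Nat.gcd r n : Nat) : Int) - (n : Int) * Nat.gcdB r n := by
      linear_combination -hab
    rw [hx, Int.sub_mul_emod_self_left, Int.emod_eq_of_lt (by positivity) (by exact_mod_cast hglt)]
  exact_mod_cast key

theorem shiftFix_gcd (s : List Char) (r : Nat) (h0 : 0 < r) (hrn : r < s.length)
    (hr : shiftFix s r) : shiftFix s (Nat.gcd r s.length) := by
  obtain ⟨k, hk⟩ := exists_mul_mod_eq_gcd r s.length h0 hrn
  have := shiftFix_mod s (k * r) (shiftFix_mul s k r hr)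
  rwa [hk] at this

theorem mod_char (s : List Char) (d : Nat) (hd : 0 < d) (hs : shiftFix s d) :
    ∀ i (h : i < s.length), s[i] = s[i % d]'(Nat.lt_of_le_of_lt (Nat.mod_le _ _) h) := by
  intro i
  induction i using Nat.strong_induction_on with
  | _ i ih =>
    intro h
    rcases lt_or_ge i d with hlt | hge
    · exact getElem_idx_eq s (Nat.mod_eq_of_lt hlt).symm _
    · have h2 := hs (i - d) (by omega)
      have he : i = (i - d + d) % s.length := by
        rw [Nat.sub_add_cancel hge, Nat.mod_eq_of_lt h]
      have h2' : s[i]'h = s[i - d]'(by omega) := (getElem_idx_eq s he _).trans h2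
      have h3 := ih (i - d) (by omega) (by omega)
      have h4 : (i - d) % d = i % d := by
        conv_rhs => rw [← Nat.sub_add_cancel hge, Nat.add_mod_right]
      exact h2'.trans (h3.trans (getElem_idx_eq s h4 _))

theorem repeat_length (t : List Char) (k : Nat) :
    ((List.replicate k t).flatten).length = k * t.length := by
  induction k with
  | zero => simp
  | succ k ih => simp [List.replicate_succ, ih, Nat.succ_mul]; omega

theorem repeat_getElem (t : List Char) (k j : Nat) (h0 : 0 < t.length)
    (hj : j < ((List.replicate k t).flatten).length) :
    ((List.replicate k t).flatten)[j] = t[j % t.length]'(Nat.mod_lt _ h0) := by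
  induction k generalizing j with
  | zero => simp at hj
  | succ k ih =>
    simp only [List.replicate_succ, List.flatten_cons] at hj ⊢
    rcases lt_or_ge j t.length with h | h
    · rw [List.getElem_append_left h]
      exact getElem_idx_eq t (Nat.mod_eq_of_lt h).symm h
    · rw [List.getElem_append_right h]
      rw [ih (j - t.length) (by simp at hj ⊢; omega)]
      exact getElem_idx_eq t (Nat.mod_eq_sub_mod h).symm _

theorem repeat_of_shift (s : List Char) (d : Nat) (hd : 0 < d) (hdvd : d ∣ s.length)
    (hn : 0 < s.length) (hs : shiftFix s d) :
    (List.replicate (s.length / d) (s.take d)).flatten = s := by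
  have hdle : d ≤ s.length := Nat.le_of_dvd hn hdvd
  have htl : (s.take d).length = d := by simp [Nat.min_eq_left hdle]
  have hlen : ((List.replicate (s.length / d) (s.take d)).flatten).length = s.length := by
    rw [repeat_length, htl, Nat.div_mul_cancel hdvd]
  apply List.ext_getElem hlen
  intro i h1 h2
  rw [repeat_getElem _ _ _ (by omega) h1]
  have step1 : (s.take d)[i % (s.take d).length]'(Nat.mod_lt _ (by omega)) =
      s[i % (s.take d).length]'(by rw [htl]; exact Nat.lt_of_lt_of_le (Nat.mod_lt _ (by omega)) hdle) :=
    List.getElem_take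
  rw [step1]
  exact ((mod_char s d hd hs i h2).trans (getElem_idx_eq s (by rw [htl]) _)).symm

-- forward: an occurrence of s inside (s++s)[1:-1] gives a nontrivial rotation fixing s
theorem shift_of_infix (s : List Char) (hn : 2 ≤ s.length)
    (h : s <:+: ((s ++ s).drop 1).take (2 * s.length - 2)) :
    ∃ r, 1 ≤ r ∧ r ≤ s.length - 1 ∧ shiftFix s r := by
  obtain ⟨u, v, huv⟩ := h
  have hL : (((s ++ s).drop 1).take (2 * s.length - 2)).length = 2 * s.length - 2 := by
    simp; omega
  have hlen : u.length + s.length + v.length = 2 * s.length - 2 := by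
    have := congrArg List.length huv
    simp at this
    omega
  refine ⟨u.length + 1, by omega, by omega, ?_⟩
  intro i hi
  have hopt : ((s ++ s))[1 + (u.length + i)]? = s[i]? := by
    calc ((s ++ s))[1 + (u.length + i)]?
        = (((s ++ s).drop 1))[u.length + i]? := (List.getElem?_drop).symm
      _ = ((((s ++ s).drop 1)).take (2 * s.length - 2))[u.length + i]? := by
          rw [List.getElem?_take]; rw [if_pos (by omega)]
      _ = (u ++ s ++ v)[u.length + i]? := by rw [← huv]
      _ = (u ++ s)[u.length + i]? := List.getElem?_append_left (by simp; omega)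
      _ = s[i]? := by rw [List.getElem?_append_right (by omega)]; congr 1; omega
  have hdbl : ((s ++ s))[1 + (u.length + i)]? =
      some (s[(1 + (u.length + i)) % s.length]'(Nat.mod_lt _ (by omega))) := by
    rw [List.getElem?_eq_getElem (by simp; omega)]
    exact congrArg some (double_getElem s _ (by omega) (by omega))
  rw [hdbl, List.getElem?_eq_getElem hi] at hopt
  have := Option.some.inj hopt
  exact (getElem_idx_eq s (show (i + (u.length + 1)) % s.length = (1 + (u.length + i)) % s.length
    from congrArg (· % s.length) (by omega)) _).trans this

-- backward: a repetition s = t^k (k ≥ 2) occurs inside (s++s)[1:-1]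
theorem infix_of_repeat (s : List Char) (d : Nat) (hd : 0 < d) (hle : d ≤ s.length / 2)
    (hdvd : d ∣ s.length) (hrep : (List.replicate (s.length / d) (s.take d)).flatten = s) :
    s <:+: ((s ++ s).drop 1).take (2 * s.length - 2) := by
  have h2d : 2 * d ≤ s.length := by
    have := (Nat.le_div_iff_mul_le (by norm_num : (0:Nat) < 2)).1 hle
    omega
  have htl : (s.take d).length = d := by simp; omega
  have hk2 : 2 ≤ s.length / d := (Nat.le_div_iff_mul_le hd).2 (by omega)
  obtain ⟨m, hm⟩ : ∃ m, s.length / d = m + 2 := ⟨s.length / d - 2, by omega⟩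
  have hdk : d * (m + 2) = s.length := by
    have := Nat.mul_div_cancel' hdvd
    rw [hm] at this
    exact this
  rw [hm] at hrep
  have hflat : ∀ a b : Nat, (List.replicate (a + b) (s.take d)).flatten =
      (List.replicate a (s.take d)).flatten ++ (List.replicate b (s.take d)).flatten := by
    intro a b; rw [List.replicate_add, List.flatten_append]
  have hone : (List.replicate 1 (s.take d)).flatten = s.take d := by simp
  have hss : s ++ s = s.take d ++ ((List.replicate (2 * m + 2) (s.take d)).flatten ++ s.take d) := by
    calc s ++ s = (List.replicate ((m + 2) + (m + 2)) (s.take d)).flatten := by rw [hflat, hrep]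
      _ = (List.replicate (1 + ((2 * m + 2) + 1)) (s.take d)).flatten := by congr 2; omega
      _ = s.take d ++ ((List.replicate (2 * m + 2) (s.take d)).flatten ++ s.take d) := by
          rw [hflat, hflat, hone]
  have hM : (List.replicate (2 * m + 2) (s.take d)).flatten =
      (List.replicate m (s.take d)).flatten ++ s := by
    calc (List.replicate (2 * m + 2) (s.take d)).flatten
        = (List.replicate (m + (m + 2)) (s.take d)).flatten := by congr 2; omega
      _ = (List.replicate m (s.take d)).flatten ++ s := by rw [hflat, hrep]
  have h1 : (2 * m + 2) * d + 2 * d = 2 * (d * (m + 2)) := by ring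
  have hMlen : ((List.replicate (2 * m + 2) (s.take d)).flatten).length = (2 * m + 2) * d := by
    rw [repeat_length, htl]
  have hXlen : ((s.take d).drop 1 ++ (List.replicate (2 * m + 2) (s.take d)).flatten).length =
      d - 1 + (2 * m + 2) * d := by
    simp only [List.length_append, List.length_drop, htl, hMlen]
  have hdrop : (s ++ s).drop 1 =
      ((s.take d).drop 1 ++ (List.replicate (2 * m + 2) (s.take d)).flatten) ++ s.take d := by
    rw [hss, List.drop_append_of_le_length (by omega), List.append_assoc]
  have htake : ((s ++ s).drop 1).take (2 * s.length - 2) =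
      ((s.take d).drop 1 ++ (List.replicate (2 * m + 2) (s.take d)).flatten) ++
        (s.take d).take (d - 1) := by
    rw [hdrop, List.take_append, List.take_of_length_le (by rw [hXlen]; omega), hXlen]
    have hidx : 2 * s.length - 2 - (d - 1 + (2 * m + 2) * d) = d - 1 := by omega
    rw [hidx]
  rw [htake, hM]
  refine ⟨(s.take d).drop 1 ++ (List.replicate m (s.take d)).flatten, (s.take d).take (d - 1), ?_⟩
  simp [List.append_assoc]

-- the two characterisations agree
theorem exrep_iff_infix (s : List Char) (hn : 2 ≤ s.length) :
    (∃ d : Nat, 1 ≤ d ∧ d ≤ s.length / 2 ∧ d ∣ s.length ∧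
        (List.replicate (s.length / d) (s.take d)).flatten = s) ↔
      s <:+: ((s ++ s).drop 1).take (2 * s.length - 2) := by
  constructor
  · rintro ⟨d, h1, h2, h3, h4⟩
    exact infix_of_repeat s d h1 h2 h3 h4
  · intro h
    obtain ⟨r, hr1, hr2, hr⟩ := shift_of_infix s hn h
    have hgpos : 0 < Nat.gcd r s.length := Nat.gcd_pos_of_pos_left _ hr1
    have hgdvd : Nat.gcd r s.length ∣ s.length := Nat.gcd_dvd_right _ _
    have hgr : Nat.gcd r s.length ≤ r := Nat.le_of_dvd hr1 (Nat.gcd_dvd_left _ _)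
    refine ⟨Nat.gcd r s.length, hgpos, ?_, hgdvd, ?_⟩
    · obtain ⟨m, hm⟩ := hgdvd
      have hm2 : 2 ≤ m := by
        rcases m with _ | _ | m
        · omega
        · simp at hm; omega
        · omega
      rw [Nat.le_div_iff_mul_le (by norm_num)]
      calc Nat.gcd r s.length * 2 ≤ Nat.gcd r s.length * m := Nat.mul_le_mul_left _ hm2
        _ = s.length := hm.symm
    · exact repeat_of_shift s _ hgpos hgdvd (by omega)
        (shiftFix_gcd s r hr1 (by omega) hr)

theorem pyGet?_take_zero (s : List Char) (m : Nat) (h0 : 0 < m) (hs : 0 < s.length) :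
    PySem.List.pyGet? (s.take m) 0 = some (s[0]'hs) := by
  have hl : 0 < (s.take m).length := by simp; omega
  simp only [PySem.List.pyGet?, PySem.List.pyIdx?]
  rw [if_pos le_rfl, if_pos (by exact_mod_cast hl)]
  simp only [Int.toNat_zero, Option.bind_some]
  rw [List.getElem?_take, if_pos h0, List.getElem?_eq_getElem hs]

theorem slice_double (s : List Char) (hn : 2 ≤ s.length) :
    PySem.List.slice (s ++ s) (some 1) (some (-1)) = ((s ++ s).drop 1).take (2 * s.length - 2) := by
  simp only [PySem.List.slice, PySem.List.clampIdx]
  norm_num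
  rw [if_neg (by omega)]
  have h2 : ((s.length : Int) + ↑s.length + -1).toNat - min 1 (s.length + s.length) = 2 * s.length - 2 := by
    omega
  have h1 : min 1 (s.length + s.length) = 1 := by omega
  rw [h2, h1, List.drop_one]

-- characterisation of port A's loop result, in Nat form
theorem A_iff (s : List Char) (hn : 2 ≤ s.length) (h0 : s[0]'(by omega) ≠ '0') :
    (hrsLoop s (PySem.List.len s)
        (PySem.List.pyRange 1 (PySem.Int.floordiv (PySem.List.len s) 2 + 1) 1) = true) ↔
      ∃ m : Nat, 1 ≤ m ∧ m ≤ s.length / 2 ∧ m ∣ s.length ∧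
        (List.replicate (s.length / m) (s.take m)).flatten = s := by
  have hfd : PySem.Int.floordiv (PySem.List.len s) 2 = ((s.length / 2 : Nat) : Int) := by
    rw [PySem.List.len_eq]
    exact_mod_cast PySem.Int.floordiv_natCast s.length 2
  rw [hrsLoop_eq_true_iff]
  constructor
  · rintro ⟨d, hd, hmod, hz, hrep⟩
    rw [PySem.List.mem_pyRange_iff_of_pos one_pos, hfd] at hd
    obtain ⟨hd1, hd2, -⟩ := hd
    set m := d.toNat with hm
    have hdm : d = (m : Int) := by omega
    have hm1 : 1 ≤ m := by omega
    have hm2 : m ≤ s.length / 2 := by omega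
    have hdvd : m ∣ s.length := by
      rw [PySem.List.len_eq, PySem.Int.mod_eq_zero_iff_dvd, hdm] at hmod
      exact_mod_cast hmod
    refine ⟨m, hm1, hm2, hdvd, ?_⟩
    rw [hdm, PySem.List.slice_to_natCast, PySem.List.len_eq] at hrep
    rw [show ((s.length : Nat) : Int) = ((s.length : Nat) : Int) from rfl] at hrep
    have : PySem.Int.floordiv ((s.length : Nat) : Int) ((m : Nat) : Int) = ((s.length / m : Nat) : Int) :=
      PySem.Int.floordiv_natCast s.length m
    rw [this] at hrep
    simpa [PySem.List.pyRepeat] using hrep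
  · rintro ⟨m, hm1, hm2, hdvd, hrep⟩
    refine ⟨(m : Int), ?_, ?_, ?_, ?_⟩
    · rw [PySem.List.mem_pyRange_iff_of_pos one_pos, hfd]
      refine ⟨by exact_mod_cast hm1, by exact_mod_cast Nat.lt_succ_of_le hm2, one_dvd _⟩
    · rw [PySem.List.len_eq, PySem.Int.mod_eq_zero_iff_dvd]
      exact_mod_cast hdvd
    · rw [PySem.List.slice_to_natCast, pyGet?_take_zero s m (by omega) (by omega)]
      simpa using h0
    · rw [PySem.List.slice_to_natCast, PySem.List.len_eq,
        PySem.Int.floordiv_natCast s.length m]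
      simpa [PySem.List.pyRepeat] using hrep

-- the generic fact, for an arbitrary character list
theorem main_lemma (s : List Char) :
    hrsLoop s (PySem.List.len s)
        (PySem.List.pyRange 1 (PySem.Int.floordiv (PySem.List.len s) 2 + 1) 1) =
      (if decide (PySem.List.len s < 2) || (PySem.List.pyGet? s 0 == some '0') then false
       else PySem.Chars.isIn s (PySem.List.slice (s ++ s) (some 1) (some (-1)))) := by
  by_cases hn : s.length < 2
  · have hsmall : s.length = 0 ∨ s.length = 1 := by omega
    have hA : PySem.List.pyRange 1 (PySem.Int.floordiv (PySem.List.len s) 2 + 1) 1 = [] := by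
      rcases hsmall with h | h <;> rw [PySem.List.len_eq, h] <;> rfl
    have hlt : PySem.List.len s < 2 := by rw [PySem.List.len_eq]; exact_mod_cast hn
    rw [hA, if_pos (by simp; exact Or.inl (by omega))]
    rfl
  · rw [Nat.not_lt] at hn
    have hs0 : PySem.List.pyGet? s 0 = some (s[0]'(by omega)) := by
      simp only [PySem.List.pyGet?, PySem.List.pyIdx?]
      rw [if_pos le_rfl, if_pos (by exact_mod_cast (show 0 < s.length by omega))]
      simp only [Int.toNat_zero, Option.bind_some]
      exact List.getElem?_eq_getElem (by omega)
    have hge : ¬ (PySem.List.len s < 2) := by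
      rw [PySem.List.len_eq, not_lt]; exact_mod_cast hn
    by_cases h0 : s[0]'(by omega) = '0'
    · have hguard : (PySem.List.pyGet? s 0 == some '0') = true := by
        rw [hs0, h0]; rfl
      rw [if_pos (by simp [hguard])]
      rw [← Bool.not_eq_true, hrsLoop_eq_true_iff]
      rintro ⟨d, hd, hmod, hz, hrep⟩
      rw [PySem.List.mem_pyRange_iff_of_pos one_pos] at hd
      obtain ⟨hd1, -, -⟩ := hd
      apply hz
      have hdm : d = ((d.toNat : Nat) : Int) := by omega
      rw [hdm, PySem.List.slice_to_natCast, pyGet?_take_zero s d.toNat (by omega) (by omega), h0]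
    · have hguard : (PySem.List.pyGet? s 0 == some '0') = false := by
        rw [hs0]
        simp only [beq_eq_false_iff_ne, ne_eq, Option.some.injEq]
        exact h0
      rw [if_neg (by simp [hguard]; omega)]
      rw [Bool.eq_iff_iff, A_iff s hn h0, PySem.Chars.isIn_iff_infix, slice_double s hn]
      exact exrep_iff_infix s hn

-- ===== VERDICT (by name: the statement is the Claim_ definition above) =====
theorem has_repeating_sequence_spec : Claim_equal_has_repeating_sequence := by
  intro num _
  unfold Spec_has_repeating_sequence has_repeating_sequence has_repeating_sequence_alt
  exact main_lemma (PySem.Int.toChars num)
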